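-- pv_equiv track=rewrite | github.com/sp-wintermute/aoc-2022 | 8_1.py | build_incremental_array
-- ===== SOURCE A (Python) =====
-- def build_incremental_array(line):
--     indices = []
--     current_max = -1
--     for i, tree in enumerate(line):
--         if tree > current_max:
--             indices.append(i)
--             current_max = tree
--     return indices
-- ===== SOURCE B (Python) =====
-- def build_incremental_array(line):
--     # Phase 1: running-maximum prefix array with the -1 sentinel in front.
--     acc = [-1]
--     for t in line:
--         acc.append(max(acc[-1], t))
--     # Phase 2: an index is a running maximum exactly where the prefix array strictly increases.
--     return [i for i, (prev, cur) in enumerate(zip(acc, acc[1:])) if cur > prev]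
-- ===== Notes on version B (the rewrite author's own statement) =====
-- stated objective: alternative
-- what changed: B first materialises the running-maximum prefix array (seeded with the -1 sentinel) and then selects, in a second pass over consecutive pairs, the indices where it strictly increases, instead of A's single loop with mutable current_max and conditional append.
import Mathlib
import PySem

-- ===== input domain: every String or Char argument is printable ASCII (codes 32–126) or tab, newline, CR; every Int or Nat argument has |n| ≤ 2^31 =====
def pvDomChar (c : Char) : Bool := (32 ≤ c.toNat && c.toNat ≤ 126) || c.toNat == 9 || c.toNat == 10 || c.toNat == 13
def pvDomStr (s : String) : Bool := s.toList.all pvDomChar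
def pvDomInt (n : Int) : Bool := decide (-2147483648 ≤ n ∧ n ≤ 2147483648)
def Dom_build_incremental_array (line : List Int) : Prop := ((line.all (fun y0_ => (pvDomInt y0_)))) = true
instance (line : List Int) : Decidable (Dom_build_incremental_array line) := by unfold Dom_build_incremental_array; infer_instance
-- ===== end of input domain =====

-- B builds the running-maximum prefix array (with the -1 sentinel) and then selects the
-- indices where it strictly increases, instead of A's single loop with a mutable current_max.


-- ===== PORT A =====
def build_incremental_array (line : List Int) : List Int :=
  ((PySem.List.enumerate line).foldl
    (fun (st : List Int × Int) p => if p.2 > st.2 then (st.1 ++ [p.1], p.2) else st)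
    ([], -1)).1

-- ===== PORT B =====
-- acc[-1] is the last element (acc is always nonempty); acc[1:] is acc.drop 1, exact here.
def build_incremental_array_alt (line : List Int) : List Int :=
  let acc := line.foldl (fun a t => a ++ [max (a.getLast?.getD (-1)) t]) [(-1 : Int)]
  ((PySem.List.enumerate (acc.zip (acc.drop 1))).filter (fun p => p.2.2 > p.2.1)).map (·.1)

-- ===== PRECONDITION & SPEC =====
def Spec_build_incremental_array (line : List Int) (out : List Int) : Prop := out = build_incremental_array_alt line
instance (line : List Int) (out : List Int) : Decidable (Spec_build_incremental_array line out) := by unfold Spec_build_incremental_array; infer_instance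

-- ===== CLAIM (what is proved, stated in full; the proofs are below) =====
def Claim_equal_build_incremental_array : Prop := ∀ (line : List Int), Dom_build_incremental_array line → Spec_build_incremental_array line (build_incremental_array line)

-- ===== LEMMAS AND PROOFS =====

/-- Common characterisation: indices (relative, starting at 0) where the running max
starting from `cm` strictly increases. -/
def pvSpec (cm : Int) : List Int → List Int
  | [] => []
  | t :: ts => (if t > cm then [(0 : Int)] else []) ++ (pvSpec (max cm t) ts).map (· + 1)

/-- Running-maximum sequence starting from seed `m` (excluding the seed). -/
def pvRunmax (m : Int) : List Int → List Int
  | [] => []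
  | t :: ts => max m t :: pvRunmax (max m t) ts

theorem aloop_eq (line : List Int) : ∀ (inds : List Int) (cm s : Int),
    ((PySem.List.enumerate line s).foldl
      (fun (st : List Int × Int) p => if p.2 > st.2 then (st.1 ++ [p.1], p.2) else st)
      (inds, cm)).1 = inds ++ (pvSpec cm line).map (· + s) := by
  induction line with
  | nil => intro inds cm s; simp [PySem.List.enumerate_nil, pvSpec]
  | cons t ts ih =>
    intro inds cm s
    rw [PySem.List.enumerate_cons]
    by_cases h : t > cm
    · have hm : max cm t = t := max_eq_right (le_of_lt h)
      simp only [List.foldl_cons, if_pos h, ih, pvSpec, hm]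
      simp [List.map_map]
      intro _ _; omega
    · have hm : max cm t = cm := max_eq_left (by omega)
      simp only [List.foldl_cons, if_neg h, ih, pvSpec, hm]
      simp [List.map_map]
      intro _ _; omega

theorem accfold_append (line : List Int) : ∀ (a b : List Int), b ≠ [] →
    line.foldl (fun a t => a ++ [max (a.getLast?.getD (-1)) t]) (a ++ b)
      = a ++ line.foldl (fun a t => a ++ [max (a.getLast?.getD (-1)) t]) b := by
  induction line with
  | nil => intro a b _; simp
  | cons t ts ih =>
    intro a b hb
    simp only [List.foldl_cons]
    have hlast : (a ++ b).getLast? = b.getLast? := List.getLast?_append_of_ne_nil a hb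
    rw [hlast, List.append_assoc]
    exact ih a (b ++ [max (b.getLast?.getD (-1)) t]) (by simp)

theorem accfold_eq (line : List Int) : ∀ (m : Int),
    line.foldl (fun a t => a ++ [max (a.getLast?.getD (-1)) t]) [m]
      = m :: pvRunmax m line := by
  induction line with
  | nil => intro m; simp [pvRunmax]
  | cons t ts ih =>
    intro m
    simp only [List.foldl_cons, pvRunmax]
    have : ([m] ++ [max m t] : List Int) = [m, max m t] := rfl
    rw [show ([m] : List Int) ++ [max ((([m] : List Int).getLast?).getD (-1)) t]
          = [m] ++ [max m t] by simp,
        accfold_append ts [m] [max m t] (by simp), ih]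
    rfl

theorem zipfilt_eq (line : List Int) : ∀ (m : Int) (s : Int),
    ((PySem.List.enumerate ((m :: pvRunmax m line).zip (pvRunmax m line)) s).filter
      (fun p => p.2.2 > p.2.1)).map (·.1) = (pvSpec m line).map (· + s) := by
  induction line with
  | nil => intro m s; simp [pvRunmax, pvSpec, PySem.List.enumerate_nil]
  | cons t ts ih =>
    intro m s
    simp only [pvRunmax, pvSpec, List.zip_cons_cons, PySem.List.enumerate_cons]
    by_cases h : t > m
    · have hgt : max m t > m := by omega
      rw [List.filter_cons_of_pos (by simpa using hgt)]
      simp only [List.map_cons, ih]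
      simp [List.map_map, if_pos h]
      intro _ _; omega
    · have hng : ¬ (max m t > m) := by omega
      rw [List.filter_cons_of_neg (by simpa using hng)]
      simp only [ih]
      simp [List.map_map, if_neg h]
      intro _ _; omega

-- ===== VERDICT (by name: the statement is the Claim_ definition above) =====
theorem build_incremental_array_spec : Claim_equal_build_incremental_array := by
  intro line _
  unfold Spec_build_incremental_array build_incremental_array build_incremental_array_alt
  rw [show (PySem.List.enumerate line : List (Int × Int)) = PySem.List.enumerate line 0 from rfl,
      aloop_eq line [] (-1) 0, accfold_eq line (-1)]
  simp only [List.drop_one, List.tail_cons]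
  rw [zipfilt_eq line (-1) 0]
  simp
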